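-- pv_equiv track=rewrite | github.com/awieckowski/Roas-Manager | roas_manager/google_ads.py | sum_by_date
-- ===== SOURCE A (Python) =====
-- def sum_by_date(input_list):
--     new_list = [[input_list[0][0], input_list[0][1], input_list[0][2]]]
--     j = 0
--     for i in range(1, len(input_list)):
--         if new_list[j][0] == input_list[i][0]:
--             new_list[j] = [new_list[j][0], new_list[j][1] + input_list[i][1], new_list[j][2] + input_list[i][2]]
--         else:
--             new_list.append([input_list[i][0], input_list[i][1], input_list[i][2]])
--             j += 1
--     return new_list
-- ===== SOURCE B (Python) =====
-- def sum_by_date(input_list):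
--     out = []
--     i = 0
--     n = len(input_list)
--     while i < n:
--         date = input_list[i][0]
--         acc1 = input_list[i][1]
--         acc2 = input_list[i][2]
--         i += 1
--         while i < n and input_list[i][0] == date:
--             acc1 += input_list[i][1]
--             acc2 += input_list[i][2]
--             i += 1
--         out.append([date, acc1, acc2])
--     return out
-- ===== Notes on version B (the rewrite author's own statement) =====
-- stated objective: simpler
-- what changed: B groups consecutive equal-date runs with an inner run-consuming loop (group-then-aggregate) instead of A's manual running index j into the output list with repeated reads and rewrites of new_list[j].
import Mathlib
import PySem

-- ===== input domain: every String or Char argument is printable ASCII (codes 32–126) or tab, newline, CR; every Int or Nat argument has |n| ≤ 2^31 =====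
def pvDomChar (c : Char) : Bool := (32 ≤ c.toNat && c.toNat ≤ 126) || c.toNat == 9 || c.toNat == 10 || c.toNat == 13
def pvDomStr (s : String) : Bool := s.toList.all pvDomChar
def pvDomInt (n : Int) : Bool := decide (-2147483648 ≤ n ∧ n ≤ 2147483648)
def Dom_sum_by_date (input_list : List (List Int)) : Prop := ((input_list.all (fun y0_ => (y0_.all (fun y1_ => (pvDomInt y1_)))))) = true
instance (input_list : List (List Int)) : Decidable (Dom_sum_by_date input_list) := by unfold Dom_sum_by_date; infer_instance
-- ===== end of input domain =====

-- B groups consecutive equal-date runs with an inner run-consuming loop instead of A's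
-- running index j into the output list; on the empty list A raises IndexError, B returns [].

-- ===== PORT A =====
-- loop body of A's for-loop, over state (new_list, j) and the current row input_list[i];
-- new_list[j] = … is List.set at j.toNat (j is produced by the loop itself, always 0 ≤ j < len(new_list))
def stepA (st : List (List Int) × Int) (r : List Int) : List (List Int) × Int :=
  let nl := st.1
  let j := st.2
  let nj := PySem.List.pyGetD nl j []
  if PySem.List.pyGetD nj 0 0 == PySem.List.pyGetD r 0 0 then
    (nl.set j.toNat [PySem.List.pyGetD nj 0 0,
                     PySem.List.pyGetD nj 1 0 + PySem.List.pyGetD r 1 0,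
                     PySem.List.pyGetD nj 2 0 + PySem.List.pyGetD r 2 0], j)
  else
    (nl ++ [[PySem.List.pyGetD r 0 0, PySem.List.pyGetD r 1 0, PySem.List.pyGetD r 2 0]], j + 1)

def sum_by_date (input_list : List (List Int)) : List (List Int) :=
  let r0 := PySem.List.pyGetD input_list 0 []
  let init : List (List Int) :=
    [[PySem.List.pyGetD r0 0 0, PySem.List.pyGetD r0 1 0, PySem.List.pyGetD r0 2 0]]
  ((PySem.List.pyRange 1 (input_list.length : Int) 1).foldl
      (fun st i => stepA st (PySem.List.pyGetD input_list i [])) (init, 0)).1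

-- ===== PORT B =====
-- B's inner while-loop: consume the rows of the current equal-date run, return the
-- accumulated sums and the remaining rows
def altInner (date a1 a2 : Int) : List (List Int) → Int × Int × List (List Int)
  | [] => (a1, a2, [])
  | r :: rest =>
    if PySem.List.pyGetD r 0 0 == date then
      altInner date (a1 + PySem.List.pyGetD r 1 0) (a2 + PySem.List.pyGetD r 2 0) rest
    else (a1, a2, r :: rest)

-- termination of the outer loop: the inner loop only consumes rows
theorem altInner_length_le (date a1 a2 : Int) (l : List (List Int)) :
    (altInner date a1 a2 l).2.2.length ≤ l.length := by
  induction l generalizing a1 a2 with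
  | nil => simp [altInner]
  | cons r rest ih =>
    simp only [altInner]
    split
    · exact le_trans (ih _ _) (Nat.le_succ _)
    · simp

-- B's outer while-loop: one output row per run
def altGo : List (List Int) → List (List Int)
  | [] => []
  | r :: rest =>
    let t := altInner (PySem.List.pyGetD r 0 0)
               (PySem.List.pyGetD r 1 0) (PySem.List.pyGetD r 2 0) rest
    [PySem.List.pyGetD r 0 0, t.1, t.2.1] :: altGo t.2.2
termination_by l => l.length
decreasing_by exact Nat.lt_succ_of_le (altInner_length_le _ _ _ _)

def sum_by_date_alt (input_list : List (List Int)) : List (List Int) :=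
  altGo input_list

-- ===== PRECONDITION & SPEC =====
-- Pre_ excludes exactly the inputs where Python A raises IndexError: the empty list
-- (input_list[0] fails) and lists containing a row with fewer than 3 entries (row[1]/row[2] fails).
def Pre_sum_by_date (input_list : List (List Int)) : Prop :=
  input_list ≠ [] ∧ ∀ r ∈ input_list, 3 ≤ r.length
instance (input_list : List (List Int)) : Decidable (Pre_sum_by_date input_list) := by
  unfold Pre_sum_by_date; infer_instance
def pvWitness_sum_by_date : List (List Int) := [[1, 2, 3], [1, 4, 5], [2, 6, 7]]

def Spec_sum_by_date (input_list : List (List Int)) (out : List (List Int)) : Prop :=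
  out = sum_by_date_alt input_list
instance (input_list : List (List Int)) (out : List (List Int)) : Decidable (Spec_sum_by_date input_list out) := by
  unfold Spec_sum_by_date; infer_instance

-- ===== CLAIM (what is proved, stated in full; the proofs are below) =====
def Claim_equal_sum_by_date : Prop := ∀ (input_list : List (List Int)), Dom_sum_by_date input_list → Pre_sum_by_date input_list → Spec_sum_by_date input_list (sum_by_date input_list)

-- ===== LEMMAS AND PROOFS =====

-- main loop invariant: with the output so far split as acc ++ [current group [d,a1,a2]]
-- and j = acc.length, A's remaining fold produces exactly B's grouping of the remaining rows
theorem foldA_eq (rows : List (List Int)) :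
    ∀ (acc : List (List Int)) (d a1 a2 : Int),
      (rows.foldl stepA (acc ++ [[d, a1, a2]], (acc.length : Int))).1 =
        acc ++ [d, (altInner d a1 a2 rows).1, (altInner d a1 a2 rows).2.1] ::
          altGo (altInner d a1 a2 rows).2.2 := by
  induction rows with
  | nil => intro acc d a1 a2; simp [altInner, altGo]
  | cons r rest ih =>
    intro acc d a1 a2
    have hget : PySem.List.pyGetD (acc ++ [[d, a1, a2]]) (acc.length : Int) [] = [d, a1, a2] := by
      rw [PySem.List.pyGetD_natCast]
      simp [List.getD]
    have hstep : stepA (acc ++ [[d, a1, a2]], (acc.length : Int)) r =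
        if PySem.List.pyGetD r 0 0 == d then
          (acc ++ [[d, a1 + PySem.List.pyGetD r 1 0, a2 + PySem.List.pyGetD r 2 0]],
            (acc.length : Int))
        else
          (acc ++ [[d, a1, a2]] ++
              [[PySem.List.pyGetD r 0 0, PySem.List.pyGetD r 1 0, PySem.List.pyGetD r 2 0]],
            (acc.length : Int) + 1) := by
      simp only [stepA, hget]
      have h0 : PySem.List.pyGetD [d, a1, a2] 0 0 = d := by
        simp [PySem.List.pyGetD]
      have h1 : PySem.List.pyGetD [d, a1, a2] 1 0 = a1 := by
        simp [PySem.List.pyGetD]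
      have h2 : PySem.List.pyGetD [d, a1, a2] 2 0 = a2 := by
        simp [PySem.List.pyGetD]
      rw [h0, h1, h2]
      by_cases hc : d = PySem.List.pyGetD r 0 0
      · simp only [hc, beq_self_eq_true, if_true]
        have hset : (acc ++ [[PySem.List.pyGetD r 0 0, a1, a2]]).set
            ((acc.length : Int)).toNat
            [PySem.List.pyGetD r 0 0, a1 + PySem.List.pyGetD r 1 0,
              a2 + PySem.List.pyGetD r 2 0] =
            acc ++ [[PySem.List.pyGetD r 0 0, a1 + PySem.List.pyGetD r 1 0,
              a2 + PySem.List.pyGetD r 2 0]] := by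
          simp
        rw [hset]
      · have hb : (d == PySem.List.pyGetD r 0 0) = false := by
          simp; exact hc
        have hb' : (PySem.List.pyGetD r 0 0 == d) = false := by
          simp; exact fun h => hc h.symm
        rw [hb, hb', if_neg (by simp), if_neg (by simp)]
    simp only [List.foldl_cons, hstep]
    by_cases hc : PySem.List.pyGetD r 0 0 == d
    · rw [if_pos hc]
      rw [ih acc d (a1 + PySem.List.pyGetD r 1 0) (a2 + PySem.List.pyGetD r 2 0)]
      simp only [altInner, if_pos hc]
    · rw [if_neg hc]
      have hlen : ((acc ++ [[d, a1, a2]]).length : Int) = (acc.length : Int) + 1 := by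
        simp
      rw [← hlen,
        ih (acc ++ [[d, a1, a2]]) (PySem.List.pyGetD r 0 0)
          (PySem.List.pyGetD r 1 0) (PySem.List.pyGetD r 2 0)]
      simp only [altInner, if_neg hc, altGo]
      simp

-- ===== VERDICT (by name: the statement is the Claim_ definition above) =====
theorem sum_by_date_spec : Claim_equal_sum_by_date := by
  intro input_list _ hpre
  obtain ⟨hne, -⟩ := hpre
  obtain ⟨r, rest, rfl⟩ := List.exists_cons_of_ne_nil hne
  unfold Spec_sum_by_date sum_by_date sum_by_date_alt
  have hr0 : PySem.List.pyGetD (r :: rest) (0 : Int) [] = r := by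
    simp [PySem.List.pyGetD]
  simp only [hr0]
  rw [PySem.List.foldl_pyRange_pyGetD' (r :: rest) ([] : List Int) stepA _ (by norm_num : (0:Int) ≤ 1)]
  simp only [Int.toNat_one, List.drop_succ_cons, List.drop_zero]
  have := foldA_eq rest ([] : List (List Int)) (PySem.List.pyGetD r 0 0)
      (PySem.List.pyGetD r 1 0) (PySem.List.pyGetD r 2 0)
  simp only [List.nil_append, List.length_nil, Nat.cast_zero] at this
  rw [this]
  simp [altGo]
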